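-- pv_equiv track=rewrite | github.com/tyler1zhang/Advanture_of_Code | GRL/.ipynb_checkpoints/solution_for_all-checkpoint.py | is_pw_valid
-- ===== SOURCE A (Python) =====
-- def is_pw_valid(pw):
--     ##checking letter pairs
--     pairs_set=set()
--     for index in range(1, len(pw)):
--         if pw[index-1]!=pw[index]:
--             continue
--         else: pairs_set.add(pw[index])
--     if len(pairs_set)<2: return False
--     ##checking straight increasing like bcd
--     for index in range(2, len(pw)):
--         if ord(pw[index])-ord(pw[index-1])==1 and ord(pw[index-1])-ord(pw[index-2])==1:
--             return True
--     return False
-- ===== SOURCE B (Python) =====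
-- def is_pw_valid(pw):
--     # single state-machine pass: carry the last two chars, the pairs set and the triple flag
--     pairs = set()
--     has_triple = False
--     prev2 = prev1 = None
--     for ch in pw:
--         if prev1 is not None and prev1 == ch:
--             pairs.add(ch)
--         if prev2 is not None and ord(ch) - ord(prev1) == 1 and ord(prev1) - ord(prev2) == 1:
--             has_triple = True
--         prev2, prev1 = prev1, ch
--     return len(pairs) >= 2 and has_triple
-- ===== Notes on version B (the rewrite author's own statement) =====
-- stated objective: alternative
-- what changed: Replaces A's two staged index-based scans (a pair-collecting pass, a size check with early return, then a separate triple-hunting pass with early return) by one state-machine pass that carries (prev2, prev1, pairs, has_triple) and decides at the end.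
import Mathlib
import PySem

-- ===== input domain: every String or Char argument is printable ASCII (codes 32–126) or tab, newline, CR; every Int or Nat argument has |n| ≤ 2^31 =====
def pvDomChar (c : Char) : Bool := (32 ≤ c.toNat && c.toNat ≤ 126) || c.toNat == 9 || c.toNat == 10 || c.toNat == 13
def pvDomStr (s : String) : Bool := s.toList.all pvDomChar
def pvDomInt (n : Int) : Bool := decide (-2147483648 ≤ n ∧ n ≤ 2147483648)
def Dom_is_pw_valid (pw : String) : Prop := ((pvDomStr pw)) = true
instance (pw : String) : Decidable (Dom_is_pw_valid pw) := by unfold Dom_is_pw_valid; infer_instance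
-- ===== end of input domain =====

-- B fuses A's two staged scans into one state-machine pass carrying (prev2, prev1, pairs, has_triple); same values everywhere.

-- ===== PORT A =====
-- literal transliteration: two loops over ranges of indices; pw[i] via pyGetD on the char list
-- (indices produced by range(1,len) / range(2,len) are always in range, so the default is never used)
def is_pw_valid (pw : String) : Bool :=
  let l := pw.toList
  let pairs : PySem.Set Char :=
    (PySem.List.pyRange 1 (PySem.Str.len pw) 1).foldl
      (fun s index =>
        if PySem.List.pyGetD l (index - 1) ' ' ≠ PySem.List.pyGetD l index ' ' then s
        else PySem.Set.add s (PySem.List.pyGetD l index ' ')) PySem.Set.empty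
  if PySem.Set.len pairs < 2 then false
  else
    (PySem.List.pyRange 2 (PySem.Str.len pw) 1).any (fun index =>
      (((PySem.List.pyGetD l index ' ').toNat : Int) - ((PySem.List.pyGetD l (index - 1) ' ').toNat : Int) == 1)
      && (((PySem.List.pyGetD l (index - 1) ' ').toNat : Int) - ((PySem.List.pyGetD l (index - 2) ' ').toNat : Int) == 1))

-- ===== PORT B =====
-- literal transliteration of Source B: one fold over the characters with state (prev2, prev1, pairs, has_triple)
def pvStep (st : Option Char × Option Char × PySem.Set Char × Bool) (ch : Char) :
    Option Char × Option Char × PySem.Set Char × Bool :=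
  let pairs' := match st.2.1 with
    | some p1 => if p1 = ch then PySem.Set.add st.2.2.1 ch else st.2.2.1
    | none => st.2.2.1
  let trip' := match st.1, st.2.1 with
    | some p2, some p1 =>
        st.2.2.2 || ((((ch.toNat : Int) - (p1.toNat : Int)) == 1)
                      && (((p1.toNat : Int) - (p2.toNat : Int)) == 1))
    | _, _ => st.2.2.2
  (st.2.1, some ch, pairs', trip')

def is_pw_valid_alt (pw : String) : Bool :=
  let st := pw.toList.foldl pvStep (none, none, PySem.Set.empty, false)
  decide (2 ≤ PySem.Set.len st.2.2.1) && st.2.2.2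

-- ===== PRECONDITION & SPEC =====
def Spec_is_pw_valid (pw : String) (out : Bool) : Prop := out = is_pw_valid_alt pw
instance (pw : String) (out : Bool) : Decidable (Spec_is_pw_valid pw out) := by unfold Spec_is_pw_valid; infer_instance

-- ===== CLAIM (what is proved, stated in full; the proofs are below) =====
def Claim_equal_is_pw_valid : Prop := ∀ (pw : String), Dom_is_pw_valid pw → Spec_is_pw_valid pw (is_pw_valid pw)

-- ===== LEMMAS AND PROOFS =====

-- the triple condition and a cons-recursion form of "some increasing triple exists"
def pvCond (a b c : Char) : Bool :=
  (((c.toNat : Int) - (b.toNat : Int)) == 1) && (((b.toNat : Int) - (a.toNat : Int)) == 1)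

def pvTripAny : List Char → Bool
  | a :: b :: c :: l => pvCond a b c || pvTripAny (b :: c :: l)
  | _ => false

-- the indices 1..len-1 read exactly the adjacent pairs zip(l, l[1:])
theorem pv_map_pairs (l : List Char) (d : Char) :
    (PySem.List.pyRange 1 (l.length : Int) 1).map
      (fun i => (PySem.List.pyGetD l (i - 1) d, PySem.List.pyGetD l i d)) = l.zip l.tail := by
  apply List.ext_getElem
  · simp [PySem.List.length_pyRange_one]
  · intro k h1 h2
    simp only [List.getElem_map, PySem.List.getElem_pyRange_one, List.getElem_zip,
      List.getElem_tail]
    have hk : k + 1 < l.length := by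
      simp [PySem.List.length_pyRange_one] at h1; omega
    have e1 : (1 : Int) + k - 1 = ((k : Nat) : Int) := by push_cast [Int.add_comm]; ring
    have e2 : (1 : Int) + k = (((k + 1 : Nat)) : Int) := by push_cast [Int.add_comm]; ring
    rw [e1, e2, PySem.List.pyGetD_natCast, PySem.List.pyGetD_natCast,
      List.getD_eq_getElem l d (by omega), List.getD_eq_getElem l d (by omega)]

-- the indices 2..len-1 read exactly the triples zip(l, l[1:], l[2:])
theorem pv_map_triples (l : List Char) (d : Char) :
    (PySem.List.pyRange 2 (l.length : Int) 1).map
      (fun i => (PySem.List.pyGetD l (i - 2) d,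
                 (PySem.List.pyGetD l (i - 1) d, PySem.List.pyGetD l i d))) =
      l.zip (l.tail.zip l.tail.tail) := by
  apply List.ext_getElem
  · simp [PySem.List.length_pyRange_one]
    omega
  · intro k h1 h2
    simp only [List.getElem_map, PySem.List.getElem_pyRange_one, List.getElem_zip,
      List.getElem_tail]
    have hk : k + 2 < l.length := by
      simp [PySem.List.length_pyRange_one] at h1; omega
    have e1 : (2 : Int) + k - 2 = ((k : Nat) : Int) := by push_cast [Int.add_comm]; ring
    have e2 : (2 : Int) + k - 1 = (((k + 1 : Nat)) : Int) := by push_cast [Int.add_comm]; ring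
    have e3 : (2 : Int) + k = (((k + 2 : Nat)) : Int) := by push_cast [Int.add_comm]; ring
    rw [e1, e2, e3, PySem.List.pyGetD_natCast, PySem.List.pyGetD_natCast, PySem.List.pyGetD_natCast,
      List.getD_eq_getElem l d (by omega), List.getD_eq_getElem l d (by omega),
      List.getD_eq_getElem l d (by omega)]

-- zip-any over triples equals the cons-recursive pvTripAny
theorem pv_zipany_eq : (l : List Char) →
    (l.zip (l.tail.zip l.tail.tail)).any (fun t => pvCond t.1 t.2.1 t.2.2) = pvTripAny l
  | [] => by simp [pvTripAny]
  | [_] => by simp [pvTripAny]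
  | [_, _] => by simp [pvTripAny]
  | a :: b :: c :: l => by
      simp only [List.tail_cons, List.zip_cons_cons, List.any_cons, pvTripAny]
      rw [← pv_zipany_eq (b :: c :: l)]
      rfl

-- A's triple loop equals pvTripAny
theorem pv_triple_eq (l : List Char) :
    (PySem.List.pyRange 2 (l.length : Int) 1).any (fun index =>
      (((PySem.List.pyGetD l index ' ').toNat : Int) - ((PySem.List.pyGetD l (index - 1) ' ').toNat : Int) == 1)
      && (((PySem.List.pyGetD l (index - 1) ' ').toNat : Int) - ((PySem.List.pyGetD l (index - 2) ' ').toNat : Int) == 1))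
    = pvTripAny l := by
  rw [← pv_zipany_eq l, ← pv_map_triples l ' ', List.any_map]
  rfl

-- the pair/trip components of B's fold, started after the first two characters
theorem pv_fold_char : ∀ (l : List Char) (a b : Char) (pairs : PySem.Set Char) (trip : Bool),
    (l.foldl pvStep (some a, some b, pairs, trip)).2.2
      = (((b :: l).zip l).foldl
           (fun s p => if p.1 = p.2 then PySem.Set.add s p.2 else s) pairs,
         trip || pvTripAny (a :: b :: l))
  | [], a, b, pairs, trip => by simp [pvTripAny]
  | c :: l, a, b, pairs, trip => by
      have hstep : pvStep (some a, some b, pairs, trip) c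
          = (some b, some c, (if b = c then PySem.Set.add pairs c else pairs),
             trip || pvCond a b c) := rfl
      simp only [List.foldl_cons, List.zip_cons_cons, pvTripAny, hstep]
      rw [pv_fold_char l b c]
      simp [Bool.or_assoc]

-- A's step function on an adjacent pair equals B's
theorem pv_stepfun_eq :
    (fun (s : PySem.Set Char) (p : Char × Char) => if p.1 ≠ p.2 then s else PySem.Set.add s p.2)
      = (fun s p => if p.1 = p.2 then PySem.Set.add s p.2 else s) := by
  funext s p
  by_cases h : p.1 = p.2 <;> simp [h]

-- A's pair loop equals the zip fold with B's step
theorem pv_pairs_eq (l : List Char) :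
    (PySem.List.pyRange 1 (l.length : Int) 1).foldl
      (fun s index =>
        if PySem.List.pyGetD l (index - 1) ' ' ≠ PySem.List.pyGetD l index ' ' then s
        else PySem.Set.add s (PySem.List.pyGetD l index ' ')) PySem.Set.empty
    = (l.zip l.tail).foldl
        (fun s p => if p.1 = p.2 then PySem.Set.add s p.2 else s) PySem.Set.empty := by
  have h : (PySem.List.pyRange 1 (l.length : Int) 1).foldl
      (fun s index =>
        if PySem.List.pyGetD l (index - 1) ' ' ≠ PySem.List.pyGetD l index ' ' then s
        else PySem.Set.add s (PySem.List.pyGetD l index ' ')) PySem.Set.empty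
    = ((PySem.List.pyRange 1 (l.length : Int) 1).map
        (fun i => (PySem.List.pyGetD l (i - 1) ' ', PySem.List.pyGetD l i ' '))).foldl
        (fun s p => if p.1 ≠ p.2 then s else PySem.Set.add s p.2) PySem.Set.empty := by
      rw [List.foldl_map]
  rw [h, pv_map_pairs l ' ', pv_stepfun_eq]

-- A's early-return guard equals B's boolean conjunction
theorem pv_final (s : PySem.Set Char) (b : Bool) :
    (if PySem.Set.len s < 2 then false else b) = (decide (2 ≤ PySem.Set.len s) && b) := by
  by_cases h : PySem.Set.len s < 2
  · have h' : ¬ (2 ≤ PySem.Set.len s) := by omega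
    rw [if_pos h, decide_eq_false h', Bool.false_and]
  · have h' : 2 ≤ PySem.Set.len s := by omega
    rw [if_neg h, decide_eq_true h', Bool.true_and]

-- ===== VERDICT (by name: the statement is the Claim_ definition above) =====
theorem is_pw_valid_spec : Claim_equal_is_pw_valid := by
  intro pw _
  unfold Spec_is_pw_valid is_pw_valid is_pw_valid_alt
  simp only [PySem.Str.len_eq, pv_pairs_eq, pv_triple_eq, pv_final]
  match h : pw.toList with
  | [] => decide
  | [a] => simp [pvStep, pvTripAny, PySem.Set.len, PySem.Set.empty]
  | a :: b :: rest =>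
    have h1 : pvStep (none, none, PySem.Set.empty, false) a
        = (none, some a, PySem.Set.empty, false) := rfl
    have h2 : pvStep (none, some a, PySem.Set.empty, false) b
        = (some a, some b,
           (if a = b then PySem.Set.add PySem.Set.empty b else PySem.Set.empty), false) := rfl
    simp only [List.foldl_cons, h1, h2]
    rw [pv_fold_char rest a b]
    simp
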